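-- pv_equiv track=rewrite | github.com/Vict0r-David/UNIPG | Proba_Arg/Old_files/Old_DATA/Old_test/FastLab.py | good_paths
-- ===== SOURCE A (Python) =====
-- def get_paths(node, end, ldico_att_out, dico_att, paths=None, current_path=None):
--     if paths is None:
--         paths = []
--     if current_path is None:
--         current_path = []
--
--     current_path.append(node)
--     if node not in ldico_att_out or node == end:
--         paths.append(current_path)
--     else:
--         children = []
--         for att in ldico_att_out[node]:
--             children.append(dico_att[att][1])
--         for child in children:
--             get_paths(child, end, ldico_att_out, dico_att, paths, list(current_path))
--     return paths
--
-- def arg_to_att(path):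
--     output = []
--     for i in range(len(path)):
--         if i+1 < len(path):
--             att = path[i] + '->' + path[i+1]
--             output.append(att)
--     return output
--
-- def good_paths(node, end, ldico_att_out, dico_att):
--     all = get_paths(node, end, ldico_att_out, dico_att)
--     paths = []
--     for path in all:
--         if path[-1] == end:
--             p = arg_to_att(path)
--             paths.append(p)
--     return paths
-- ===== SOURCE B (Python) =====
-- # B: single fused recursion returning edge-lists directly -- no intermediate
-- # all-node-paths list, no accumulator threading, end-filter and edge conversion
-- # fused into the traversal.
-- def good_paths(node, end, ldico_att_out, dico_att):
--     if node not in ldico_att_out or node == end: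
--         return [[]] if node == end else []
--     result = []
--     for att in ldico_att_out[node]:
--         child = dico_att[att][1]
--         edge = node + '->' + child
--         result += [[edge] + tail for tail in good_paths(child, end, ldico_att_out, dico_att)]
--     return result
-- ===== Notes on version B (the rewrite author's own statement) =====
-- stated objective: simpler
-- what changed: B replaces A's three phases (accumulate all node-paths via get_paths with mutable accumulators, filter for last==end, convert each kept path with arg_to_att) by one self-contained recursion that returns the '->' edge-lists of good paths directly, so the intermediate all-paths list, the path copies and the second pass disappear.
import Mathlib
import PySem

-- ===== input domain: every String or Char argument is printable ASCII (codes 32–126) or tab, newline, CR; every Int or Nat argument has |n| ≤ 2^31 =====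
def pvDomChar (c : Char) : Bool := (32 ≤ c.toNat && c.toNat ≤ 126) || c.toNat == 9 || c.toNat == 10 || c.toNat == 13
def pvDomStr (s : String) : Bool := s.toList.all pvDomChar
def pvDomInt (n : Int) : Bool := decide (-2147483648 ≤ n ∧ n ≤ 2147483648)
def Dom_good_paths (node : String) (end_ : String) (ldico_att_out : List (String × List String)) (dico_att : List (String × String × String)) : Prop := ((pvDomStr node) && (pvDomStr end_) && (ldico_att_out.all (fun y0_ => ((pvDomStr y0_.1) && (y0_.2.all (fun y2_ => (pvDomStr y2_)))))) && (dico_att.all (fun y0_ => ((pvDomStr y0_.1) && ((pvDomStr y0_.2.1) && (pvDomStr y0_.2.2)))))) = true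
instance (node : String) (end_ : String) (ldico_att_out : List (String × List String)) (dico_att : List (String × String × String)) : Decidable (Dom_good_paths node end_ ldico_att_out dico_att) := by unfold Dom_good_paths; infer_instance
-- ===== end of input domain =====

-- B fuses get_paths, the end-filter and arg_to_att into one recursion that returns
-- edge-lists directly (simpler: no intermediate all-node-paths list, no accumulators).

-- ===== PORT A =====
-- get_paths, ported with explicit fuel: the Python recursion terminates exactly on the
-- acyclic inputs Pre_ admits, where the fuel (set in good_paths below) never runs out.
def pvGetPaths (end_ : String) (l : List (String × List String)) (d : List (String × String × String)) : Nat → String → List (List String) → List String → List (List String)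
  | 0, node, paths, current_path => paths ++ [current_path ++ [node]]
  | fuel+1, node, paths, current_path =>
    let current_path := current_path ++ [node]
    if ((PySem.Dict.mk l).contains node) = false || node == end_ then
      paths ++ [current_path]
    else
      -- 'ldico_att_out[node]' : the key is present in this branch, so getD is exact;
      -- 'dico_att[att][1]' raises KeyError on a missing att — Pre_ excludes that, so the getD default is unreachable there
      let children := ((PySem.Dict.mk l).getD node []).map
        (fun att => ((PySem.Dict.mk d).getD att ("", "")).2)
      children.foldl (fun paths child => pvGetPaths end_ l d fuel child paths current_path) paths

-- arg_to_att; the indices the loop reads are in range, so pyGetD is exact for path[i]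
def pvArgToAtt (path : List String) : List String :=
  (PySem.List.pyRange 0 (path.length : Int) 1).foldl
    (fun output i =>
      if i + 1 < (path.length : Int) then
        output ++ [PySem.List.pyGetD path i "" ++ "->" ++ PySem.List.pyGetD path (i+1) ""]
      else output) []

def good_paths (node : String) (end_ : String) (ldico_att_out : List (String × List String)) (dico_att : List (String × String × String)) : List (List String) :=
  let all := pvGetPaths end_ ldico_att_out dico_att (ldico_att_out.length + 1) node [] []
  -- 'path[-1] == end' : every produced path is nonempty, so pyGet? never yields none here
  all.foldl (fun paths path =>
    if (PySem.List.pyGet? path (-1) == some end_) then paths ++ [pvArgToAtt path] else paths) []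

-- ===== PORT B =====
-- same fuel device as port A (the Python B recursion terminates on the same inputs)
def pvGoodFrom (end_ : String) (l : List (String × List String)) (d : List (String × String × String)) : Nat → String → List (List String)
  | 0, node => if node == end_ then [[]] else []
  | fuel+1, node =>
    if ((PySem.Dict.mk l).contains node) = false || node == end_ then
      if node == end_ then [[]] else []
    else
      ((PySem.Dict.mk l).getD node []).foldl
        (fun result att =>
          let child := ((PySem.Dict.mk d).getD att ("", "")).2
          let edge := node ++ "->" ++ child
          result ++ (pvGoodFrom end_ l d fuel child).map (fun tail => edge :: tail)) []

def good_paths_alt (node : String) (end_ : String) (ldico_att_out : List (String × List String)) (dico_att : List (String × String × String)) : List (List String) :=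
  pvGoodFrom end_ ldico_att_out dico_att (ldico_att_out.length + 1) node

-- ===== PRECONDITION & SPEC =====
-- helpers for Pre_: the successor relation of the traversal and bounded reachability
def pvChildrenOf (end_ : String) (l : List (String × List String)) (d : List (String × String × String)) (u : String) : List String :=
  if u == end_ then [] else
  match (PySem.Dict.mk l).get? u with
  | none => []
  | some atts => atts.map (fun a => ((PySem.Dict.mk d).getD a ("", "")).2)

def pvStep (end_ : String) (l : List (String × List String)) (d : List (String × String × String)) (S : List String) : List String :=
  PySem.Set.ofList (S ++ S.flatMap (pvChildrenOf end_ l d))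

def pvReach (end_ : String) (l : List (String × List String)) (d : List (String × String × String)) (start : List String) : List String :=
  (pvStep end_ l d)^[l.length + 2] start

-- Pre_ = exactly the inputs on which the Python A returns: every attack name on a node
-- reachable from `node` is a key of dico_att (otherwise A raises KeyError) and no node
-- reachable from `node` lies on a cycle (otherwise A recurses forever).
def Pre_good_paths (node : String) (end_ : String) (ldico_att_out : List (String × List String)) (dico_att : List (String × String × String)) : Prop :=
  (∀ u ∈ pvReach end_ ldico_att_out dico_att [node], u ≠ end_ →
      ∀ a ∈ (PySem.Dict.mk ldico_att_out).getD u [], ((PySem.Dict.mk dico_att).contains a) = true) ∧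
  (∀ u ∈ pvReach end_ ldico_att_out dico_att [node],
      u ∉ pvReach end_ ldico_att_out dico_att (pvChildrenOf end_ ldico_att_out dico_att u))
instance (node : String) (end_ : String) (ldico_att_out : List (String × List String)) (dico_att : List (String × String × String)) : Decidable (Pre_good_paths node end_ ldico_att_out dico_att) := by unfold Pre_good_paths; infer_instance

def pvWitness_good_paths : String × String × (List (String × List String)) × (List (String × String × String)) :=
  ("a", "c", [("a", ["x"]), ("b", ["y"])], [("x", ("a", "b")), ("y", ("b", "c"))])

def Spec_good_paths (node : String) (end_ : String) (ldico_att_out : List (String × List String)) (dico_att : List (String × String × String)) (out : List (List String)) : Prop := out = good_paths_alt node end_ ldico_att_out dico_att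
instance (node : String) (end_ : String) (ldico_att_out : List (String × List String)) (dico_att : List (String × String × String)) (out : List (List String)) : Decidable (Spec_good_paths node end_ ldico_att_out dico_att out) := by unfold Spec_good_paths; infer_instance

-- ===== CLAIM (what is proved, stated in full; the proofs are below) =====
def Claim_equal_good_paths : Prop := ∀ (node : String) (end_ : String) (ldico_att_out : List (String × List String)) (dico_att : List (String × String × String)), Dom_good_paths node end_ ldico_att_out dico_att → Pre_good_paths node end_ ldico_att_out dico_att → Spec_good_paths node end_ ldico_att_out dico_att (good_paths node end_ ldico_att_out dico_att)

-- ===== LEMMAS AND PROOFS =====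
-- (the equivalence in fact holds for every input and every common fuel value;
--  the lemmas below prove it unconditionally, and the claim specialises it)

-- proof-side view of get_paths: the list of node-paths hanging from `node`
def pvSuff (end_ : String) (l : List (String × List String)) (d : List (String × String × String)) : Nat → String → List (List String)
  | 0, node => [[node]]
  | fuel+1, node =>
    if ((PySem.Dict.mk l).contains node) = false || node == end_ then [[node]]
    else (((PySem.Dict.mk l).getD node []).map
        (fun att => ((PySem.Dict.mk d).getD att ("", "")).2)).flatMap
      (fun c => (pvSuff end_ l d fuel c).map (node :: ·))

-- proof-side view of arg_to_att: zip consecutive nodes into edge names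
def pvZW : List String → List String
  | x :: y :: r => (x ++ "->" ++ y) :: pvZW (y :: r)
  | _ => []

theorem pvRangeFilter (m : Nat) : (List.range m).filter (fun k => decide (k+1 < m)) = List.range (m-1) := by
  cases m with
  | zero => simp
  | succ s =>
    simp only [Nat.add_sub_cancel, List.range_succ, List.filter_append]
    simp [List.filter_eq_self, List.mem_range]

theorem pvArgToAtt_char (p : List String) :
    pvArgToAtt p = (List.range (p.length - 1)).map
      (fun k => p.getD k "" ++ "->" ++ p.getD (k+1) "") := by
  unfold pvArgToAtt
  rw [PySem.List.pyRange_zero_natCast p.length, List.foldl_map]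
  have h2 : (fun (output : List String) (k : Nat) =>
      if ((k : Int) + 1 < (p.length : Int)) then
        output ++ [PySem.List.pyGetD p (k:Int) "" ++ "->" ++ PySem.List.pyGetD p ((k:Int)+1) ""]
      else output)
    = (fun output k =>
      if (fun k => decide (k + 1 < p.length)) k = true then
        output ++ [(fun k => p.getD k "" ++ "->" ++ p.getD (k+1) "") k] else output) := by
    funext output k
    have hcast : ((k:Int) + 1) = (((k+1 : Nat)) : Int) := by push_cast; ring
    by_cases h : k + 1 < p.length
    · rw [if_pos (by exact_mod_cast h), if_pos (by simpa using h)]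
      rw [hcast, PySem.List.pyGetD_natCast, PySem.List.pyGetD_natCast]
    · rw [if_neg (by exact_mod_cast h), if_neg (by simpa using h)]
  rw [h2, PySem.List.foldl_append_if, pvRangeFilter]
  simp

theorem pvArgToAtt_eq_zw : ∀ (p : List String), pvArgToAtt p = pvZW p := by
  intro p
  induction p with
  | nil => simp [pvArgToAtt_char, pvZW]
  | cons x t ih =>
    cases t with
    | nil => simp [pvArgToAtt_char, pvZW]
    | cons y r =>
      rw [pvArgToAtt_char] at ih ⊢
      simp only [List.length_cons, Nat.add_sub_cancel] at ih ⊢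
      rw [show List.range (r.length + 1) = 0 :: (List.range r.length).map Nat.succ from
        List.range_succ_eq_map]
      simp only [List.map_cons, List.map_map, pvZW]
      rw [List.cons.injEq]
      refine ⟨by simp, ?_⟩
      rw [← ih]
      simp [Function.comp_def]

theorem pvGetPaths_eq_suff (end_ : String) (l : List (String × List String)) (d : List (String × String × String)) :
    ∀ (fuel : Nat) (node : String) (paths : List (List String)) (cur : List String),
      pvGetPaths end_ l d fuel node paths cur = paths ++ (pvSuff end_ l d fuel node).map (cur ++ ·) := by
  intro fuel
  induction fuel with
  | zero => intro node paths cur; simp [pvGetPaths, pvSuff]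
  | succ f ih =>
    intro node paths cur
    simp only [pvGetPaths, pvSuff]
    by_cases h : (((PySem.Dict.mk l).contains node) = false || node == end_) = true
    · rw [if_pos h, if_pos h]; simp
    · rw [if_neg h, if_neg h]
      rw [PySem.List.foldl_congr_mem _ _
        (fun paths c => paths ++ (pvSuff end_ l d f c).map ((cur ++ [node]) ++ ·)) _
        (fun acc x _ => ih x acc (cur ++ [node]))]
      rw [PySem.List.foldl_append_eq_flatMap]
      simp [List.map_flatMap, List.map_map, Function.comp_def]

theorem pvSuff_shape (end_ : String) (l : List (String × List String)) (d : List (String × String × String))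
    (fuel : Nat) (node : String) {p : List String} (hp : p ∈ pvSuff end_ l d fuel node) :
    ∃ t, p = node :: t := by
  cases fuel with
  | zero => simp only [pvSuff, List.mem_singleton] at hp; exact ⟨[], hp⟩
  | succ f =>
    simp only [pvSuff] at hp
    split at hp
    · simp only [List.mem_singleton] at hp; exact ⟨[], hp⟩
    · simp only [List.mem_flatMap, List.mem_map] at hp
      obtain ⟨c, _, t, _, rfl⟩ := hp
      exact ⟨t, rfl⟩

theorem pvMain (end_ : String) (l : List (String × List String)) (d : List (String × String × String)) :
    ∀ (fuel : Nat) (node : String),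
      ((pvSuff end_ l d fuel node).filter
        (fun path => PySem.List.pyGet? path (-1) == some end_)).map pvArgToAtt
      = pvGoodFrom end_ l d fuel node := by
  intro fuel
  induction fuel with
  | zero =>
    intro node
    simp only [pvSuff, pvGoodFrom, List.filter_cons, List.filter_nil,
      PySem.List.pyGet?_neg_one, List.getLast?_singleton]
    by_cases h : node == end_
    · simp only [h]
      simp only [if_pos]
      simp [pvArgToAtt_eq_zw, beq_iff_eq] at *
      simp [h]
      rfl
    · simp_all [beq_iff_eq]
  | succ f ih =>
    intro node
    simp only [pvSuff, pvGoodFrom]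
    by_cases h : (((PySem.Dict.mk l).contains node) = false || node == end_) = true
    · rw [if_pos h, if_pos h]
      by_cases he : node == end_
      · simp [pvArgToAtt_eq_zw, pvZW, PySem.List.pyGet?_neg_one, he]
      · simp [PySem.List.pyGet?_neg_one, he]
    · rw [if_neg h, if_neg h]
      rw [show (fun (result : List (List String)) (att : String) =>
            let child := ((PySem.Dict.mk d).getD att ("", "")).2
            let edge := node ++ "->" ++ child
            result ++ (pvGoodFrom end_ l d f child).map (fun tail => edge :: tail))
          = (fun result att => result ++
              ((pvGoodFrom end_ l d f ((PySem.Dict.mk d).getD att ("", "")).2).map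
                (fun tail => (node ++ "->" ++ ((PySem.Dict.mk d).getD att ("", "")).2) :: tail))) from rfl]
      rw [PySem.List.foldl_append_eq_flatMap]
      rw [List.filter_flatMap, List.map_flatMap, List.flatMap_map]
      simp only [List.nil_append]
      congr 1
      funext att
      set c := ((PySem.Dict.mk d).getD att ("", "")).2 with hc
      rw [List.filter_map]
      have hfil : (pvSuff end_ l d f c).filter
          ((fun path => PySem.List.pyGet? path (-1) == some end_) ∘ (node :: ·))
          = (pvSuff end_ l d f c).filter (fun path => PySem.List.pyGet? path (-1) == some end_) := by
        apply List.filter_congr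
        intro t ht
        obtain ⟨t', rfl⟩ := pvSuff_shape end_ l d f c ht
        simp [PySem.List.pyGet?_neg_one, List.getLast?_cons_cons]
      rw [hfil, List.map_map]
      have hmap : ((pvSuff end_ l d f c).filter
            (fun path => PySem.List.pyGet? path (-1) == some end_)).map (pvArgToAtt ∘ (node :: ·))
          = ((pvSuff end_ l d f c).filter
            (fun path => PySem.List.pyGet? path (-1) == some end_)).map
              (fun t => (node ++ "->" ++ c) :: pvArgToAtt t) := by
        apply List.map_congr_left
        intro t ht
        obtain ⟨t', rfl⟩ := pvSuff_shape end_ l d f c (List.mem_of_mem_filter ht)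
        simp [pvArgToAtt_eq_zw, pvZW]
      rw [hmap, ← ih c, List.map_map]
      rfl

-- ===== VERDICT (by name: the statement is the Claim_ definition above) =====
theorem good_paths_spec : Claim_equal_good_paths := by
  intro node end_ l d _ _
  unfold Spec_good_paths good_paths good_paths_alt
  rw [pvGetPaths_eq_suff]
  rw [show (fun (paths : List (List String)) (path : List String) =>
        if (PySem.List.pyGet? path (-1) == some end_) then paths ++ [pvArgToAtt path] else paths)
      = (fun paths path => if (fun p => PySem.List.pyGet? p (-1) == some end_) path then paths ++ [pvArgToAtt path] else paths) from rfl]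
  rw [PySem.List.foldl_append_if]
  simpa using pvMain end_ l d (l.length + 1) node
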